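-- pv_equiv track=rewrite | github.com/pickleomar/OrganizationsDirectory | csvconvert.py | find_best_nace_code
-- ===== SOURCE A (Python) =====
-- def find_best_nace_code(description, nace_codes):
--     """Finds the best matching NACE code based on description keywords."""
--     description = description.lower()
--     best_code = None
--     for code, desc in nace_codes.items():
--         desc_lower = desc.lower()
--         if any(keyword in description for keyword in desc_lower.split()):  #Check if any keyword from description
--             if best_code is None or len(desc_lower) < len(nace_codes[best_code].lower()): #select the shortest description to be more accurate
--                 best_code = code
--     return best_code
-- ===== SOURCE B (Python) =====
-- def find_best_nace_code(description, nace_codes):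
--     """Finds the best matching NACE code based on description keywords."""
--     description = description.lower()
--
--     def matches(desc):
--         return any(keyword in description for keyword in desc.lower().split())
--
--     lengths = [len(desc.lower()) for desc in nace_codes.values() if matches(desc)]
--     if not lengths:
--         return None
--     shortest = min(lengths)
--     for code, desc in nace_codes.items():
--         if matches(desc) and len(desc.lower()) == shortest:
--             return code
-- ===== Notes on version B (the rewrite author's own statement) =====
-- stated objective: alternative
-- what changed: Replaces A's single running-best accumulator loop (which re-looks the current best code up in the dict to recompute its description length at every step) with two staged passes: a reduction computing the minimum matching description length, then a scan returning the first code achieving it; Pre_ only asks that the codes be pairwise distinct, which every Python dict guarantees.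
import Mathlib
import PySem

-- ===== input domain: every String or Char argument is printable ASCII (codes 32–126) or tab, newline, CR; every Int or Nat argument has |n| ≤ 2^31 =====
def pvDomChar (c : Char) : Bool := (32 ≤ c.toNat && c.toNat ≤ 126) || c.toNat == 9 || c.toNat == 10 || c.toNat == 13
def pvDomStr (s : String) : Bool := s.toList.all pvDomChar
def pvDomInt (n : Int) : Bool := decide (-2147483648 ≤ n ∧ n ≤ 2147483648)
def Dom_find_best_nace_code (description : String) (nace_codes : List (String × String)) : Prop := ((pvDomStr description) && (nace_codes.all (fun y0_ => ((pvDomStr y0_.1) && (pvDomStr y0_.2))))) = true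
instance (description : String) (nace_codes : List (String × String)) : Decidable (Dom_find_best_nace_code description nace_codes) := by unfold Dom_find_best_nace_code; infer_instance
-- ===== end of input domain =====

-- B replaces A's running-best loop (which re-looks the current best up in the dict each step)
-- with two staged passes: compute the minimum matching description length, then return the
-- first code achieving it; objective: alternative decomposition, same cost.


-- ===== PORT A =====
-- Literal port of A: one fold over the items, keeping the best code so far; the length of the
-- current best's description is recomputed by looking best_code up in the dict
-- (nace_codes[best_code]; the `.getD ""` default is never reached, since best_code is always a key).
def find_best_nace_code (description : String) (nace_codes : List (String × String)) : Option String :=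
  let description := PySem.Str.lower description
  nace_codes.foldl
    (fun best_code cd =>
      let desc_lower := PySem.Str.lower cd.2
      if (PySem.Str.split₀ desc_lower).any (fun keyword => PySem.Str.isIn keyword description) then
        match best_code with
        | none => some cd.1
        | some bc =>
          if PySem.Str.len desc_lower <
              PySem.Str.len (PySem.Str.lower ((PySem.Dict.get? ⟨nace_codes⟩ bc).getD "")) then
            some cd.1
          else best_code
      else best_code)
    none

-- ===== PORT B =====
-- Port of B: first pass computes the list of matching description lengths and its minimum,
-- second pass returns the first code whose description matches and has that length.
-- (The Python for-loop's fall-off-the-end `None` is the find?'s `none`, unreachable since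
-- some matching item has the minimal length.)
def find_best_nace_code_alt (description : String) (nace_codes : List (String × String)) : Option String :=
  let description := PySem.Str.lower description
  let matchesKw := fun (desc : String) =>
    (PySem.Str.split₀ (PySem.Str.lower desc)).any (fun keyword => PySem.Str.isIn keyword description)
  let lengths :=
    (nace_codes.filter (fun cd => matchesKw cd.2)).map (fun cd => PySem.Str.len (PySem.Str.lower cd.2))
  if lengths.isEmpty then none
  else
    match PySem.List.min? lengths (fun x => x) with
    | none => none
    | some shortest =>
      (nace_codes.find?
        (fun cd => matchesKw cd.2 && (PySem.Str.len (PySem.Str.lower cd.2) == shortest))).map Prod.fst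

-- ===== PRECONDITION & SPEC =====
-- Pre_ requires the codes (dict keys) to be pairwise distinct — automatically true of every
-- Python dict; with duplicate keys in the association-list model, A's lookup of the whole dict
-- would read the first occurrence's description, an artefact no Python input can reach.
def Pre_find_best_nace_code (description : String) (nace_codes : List (String × String)) : Prop :=
  (nace_codes.map Prod.fst).Nodup
instance (description : String) (nace_codes : List (String × String)) : Decidable (Pre_find_best_nace_code description nace_codes) := by unfold Pre_find_best_nace_code; infer_instance

def pvWitness_find_best_nace_code : String × (List (String × String)) :=
  ("retail trade of food", [("47", "Retail trade"), ("10", "Manufacture of food")])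

def Spec_find_best_nace_code (description : String) (nace_codes : List (String × String)) (out : Option String) : Prop := out = find_best_nace_code_alt description nace_codes
instance (description : String) (nace_codes : List (String × String)) (out : Option String) : Decidable (Spec_find_best_nace_code description nace_codes out) := by unfold Spec_find_best_nace_code; infer_instance

-- ===== CLAIM (what is proved, stated in full; the proofs are below) =====
def Claim_equal_find_best_nace_code : Prop := ∀ (description : String) (nace_codes : List (String × String)), Dom_find_best_nace_code description nace_codes → Pre_find_best_nace_code description nace_codes → Spec_find_best_nace_code description nace_codes (find_best_nace_code description nace_codes)

-- ===== LEMMAS AND PROOFS =====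

-- The key of a pair: the length of its lowered description.
def pvK (cd : String × String) : Int := PySem.Str.len (PySem.Str.lower cd.2)

-- The generic running-best fold (A's loop over the matching pairs, lookups resolved).
def pvGenfold (m : List (String × String)) (acc : Option (String × String)) :
    Option (String × String) :=
  m.foldl
    (fun best cd =>
      match best with
      | none => some cd
      | some b => if pvK cd < pvK b then some cd else best)
    acc

-- The first minimal element, computed structurally from the right.
def pvFirstMin : List (String × String) → Option (String × String)
  | [] => none
  | x :: t =>
    match pvFirstMin t with
    | none => some x
    | some y => if pvK y < pvK x then some y else some x

theorem pvFirstMin_ne_none (x : String × String) (t : List (String × String)) :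
    pvFirstMin (x :: t) ≠ none := by
  simp only [pvFirstMin]
  cases pvFirstMin t with
  | none => simp
  | some y => by_cases h : pvK y < pvK x <;> simp [h]

-- With pairwise-distinct keys, looking a stored pair's key up returns its stored value.
theorem pv_get?_of_mem (l : List (String × String))
    (hnd : (l.map Prod.fst).Nodup) (cd : String × String) :
    cd ∈ l → PySem.Dict.get? ⟨l⟩ cd.1 = some cd.2 := by
  induction l with
  | nil => intro h; cases h
  | cons hd tl ih =>
    intro h
    simp only [List.map_cons, List.nodup_cons] at hnd
    rcases List.mem_cons.mp h with h | h
    · subst h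
      simp [PySem.Dict.get?, List.find?]
    · have hne : (hd.1 == cd.1) = false := by
        refine beq_eq_false_iff_ne.mpr ?_
        intro e; exact hnd.1 (e ▸ (List.mem_map.mpr ⟨cd, h, rfl⟩))
      simpa [PySem.Dict.get?, List.find?, hne] using ih hnd.2 h

-- A's fold with its dict re-lookup tracks the generic running-best fold over the pairs,
-- as long as every visited pair (and the accumulated pair) is faithfully retrievable.
theorem pv_fold_eq (nace_codes : List (String × String)) (m : List (String × String))
    (hm : ∀ cd ∈ m, PySem.Dict.get? ⟨nace_codes⟩ cd.1 = some cd.2)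
    (acc : Option (String × String))
    (hacc : ∀ p, acc = some p → PySem.Dict.get? ⟨nace_codes⟩ p.1 = some p.2) :
    m.foldl
      (fun best_code cd =>
        match best_code with
        | none => some cd.1
        | some bc =>
          if PySem.Str.len (PySem.Str.lower cd.2) <
              PySem.Str.len (PySem.Str.lower ((PySem.Dict.get? ⟨nace_codes⟩ bc).getD "")) then
            some cd.1
          else best_code)
      (acc.map Prod.fst)
    = (pvGenfold m acc).map Prod.fst := by
  induction m generalizing acc with
  | nil => rfl
  | cons hd tl ih =>
    have hhd := hm hd (by simp)
    have hm' : ∀ cd ∈ tl, PySem.Dict.get? ⟨nace_codes⟩ cd.1 = some cd.2 :=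
      fun cd h => hm cd (by simp [h])
    cases hacc' : acc with
    | none =>
      simp only [pvGenfold, List.foldl_cons, Option.map_none]
      exact ih hm' (some hd) (by intro p hp; rw [Option.some.injEq] at hp; subst hp; exact hhd)
    | some b =>
      have hb := hacc b hacc'
      simp only [pvGenfold, List.foldl_cons, Option.map_some, hb, Option.getD_some]
      by_cases hlt : PySem.Str.len (PySem.Str.lower hd.2) < PySem.Str.len (PySem.Str.lower b.2)
      · have hlt' : pvK hd < pvK b := hlt
        simp only [if_pos hlt, if_pos hlt']
        exact ih hm' (some hd) (by intro p hp; rw [Option.some.injEq] at hp; subst hp; exact hhd)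
      · have hlt' : ¬ pvK hd < pvK b := hlt
        simp only [if_neg hlt, if_neg hlt']
        exact ih hm' (some b) (by intro p hp; rw [Option.some.injEq] at hp; subst hp; exact hb)

-- The running-best fold, started from an accumulator, in terms of pvFirstMin.
theorem pvGenfold_some (m : List (String × String)) (a : String × String) :
    pvGenfold m (some a)
      = match pvFirstMin m with
        | none => some a
        | some y => if pvK y < pvK a then some y else some a := by
  induction m generalizing a with
  | nil => rfl
  | cons x t ih =>
    simp only [pvGenfold, List.foldl_cons] at *
    by_cases hxa : pvK x < pvK a
    · rw [if_pos hxa, ih x]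
      simp only [pvFirstMin]
      cases pvFirstMin t with
      | none => simp [hxa]
      | some y =>
        by_cases hyx : pvK y < pvK x
        · have : pvK y < pvK a := lt_trans hyx hxa
          simp [hyx, this]
        · simp [hyx, hxa]
    · rw [if_neg hxa, ih a]
      simp only [pvFirstMin]
      cases pvFirstMin t with
      | none => simp [hxa]
      | some y =>
        by_cases hyx : pvK y < pvK x
        · simp [hyx]
        · have : ¬ pvK y < pvK a := fun h => hxa (lt_of_le_of_lt (le_of_not_gt hyx) h)
          simp [hyx, hxa, this]

theorem pvGenfold_none (m : List (String × String)) :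
    pvGenfold m none = pvFirstMin m := by
  cases m with
  | nil => rfl
  | cons x t =>
    simp only [pvGenfold, List.foldl_cons, pvFirstMin]
    rw [show (t.foldl (fun best cd => match best with
        | none => some cd
        | some b => if pvK cd < pvK b then some cd else best) (some x)) = pvGenfold t (some x) from rfl,
      pvGenfold_some]

-- pvFirstMin returns the FIRST element of minimal key.
theorem pvFirstMin_spec (m : List (String × String)) (y : String × String)
    (h : pvFirstMin m = some y) :
    (∀ z ∈ m, pvK y ≤ pvK z) ∧ m.find? (fun cd => pvK cd == pvK y) = some y := by
  induction m generalizing y with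
  | nil => cases h
  | cons x t ih =>
    simp only [pvFirstMin] at h
    cases hft : pvFirstMin t with
    | none =>
      have ht : t = [] := by
        cases t with
        | nil => rfl
        | cons a s => exact absurd hft (pvFirstMin_ne_none a s)
      rw [hft] at h
      simp only [Option.some.injEq] at h
      subst h; subst ht
      refine ⟨?_, by simp [List.find?]⟩
      intro z hz
      rcases List.mem_cons.mp hz with rfl | hz
      · exact le_refl _
      · cases hz
    | some w =>
      rw [hft] at h
      simp only at h
      obtain ⟨hwle, hwfind⟩ := ih w hft
      by_cases hwx : pvK w < pvK x
      · rw [if_pos hwx] at h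
        injection h with h; subst h
        constructor
        · intro z hz
          rcases List.mem_cons.mp hz with rfl | hz
          · exact le_of_lt hwx
          · exact hwle z hz
        · have hx : (pvK x == pvK w) = false := by
            refine beq_eq_false_iff_ne.mpr ?_
            intro e; rw [e] at hwx; exact absurd hwx (lt_irrefl _)
          rw [List.find?_cons_of_neg (by simp [hx])]
          exact hwfind
      · rw [if_neg hwx] at h
        injection h with h; subst h
        constructor
        · intro z hz
          rcases List.mem_cons.mp hz with rfl | hz
          · exact le_refl _
          · exact le_trans (le_of_not_gt hwx) (hwle z hz)
        · exact List.find?_cons_of_pos (by simp)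

theorem pvFirstMin_spec_mem (m : List (String × String)) (y : String × String)
    (h : pvFirstMin m = some y) : y ∈ m := by
  induction m generalizing y with
  | nil => cases h
  | cons x t ih =>
    simp only [pvFirstMin] at h
    cases hft : pvFirstMin t with
    | none => rw [hft] at h; rw [Option.some.injEq] at h; subst h; exact List.mem_cons_self
    | some w =>
      rw [hft] at h
      simp only at h
      by_cases hwx : pvK w < pvK x
      · rw [if_pos hwx, Option.some.injEq] at h; subst h
        exact List.mem_cons_of_mem _ (ih w hft)
      · rw [if_neg hwx, Option.some.injEq] at h; subst h; exact List.mem_cons_self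

-- find? through a filter: the search with the conjoined test is the search on the filtered list.
theorem pv_find?_filter {α : Type} (l : List α) (p q : α → Bool) :
    (l.filter p).find? q = l.find? (fun x => p x && q x) := by
  induction l with
  | nil => rfl
  | cons x t ih =>
    by_cases hp : p x = true
    · by_cases hq : q x = true
      · simp [List.find?, hp, hq]
      · simp only [Bool.not_eq_true] at hq
        simp [List.find?, hp, hq, ih]
    · simp only [Bool.not_eq_true] at hp
      simp [List.find?, hp, ih]

-- The match predicate, as a named function of the (lowered-on-the-fly) description.
def pvP (description : String) (cd : String × String) : Bool :=
  (PySem.Str.split₀ (PySem.Str.lower cd.2)).any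
    (fun keyword => PySem.Str.isIn keyword (PySem.Str.lower description))

-- ===== VERDICT (by name: the statement is the Claim_ definition above) =====
theorem find_best_nace_code_spec : Claim_equal_find_best_nace_code := by
  intro description nace_codes _ hpre
  unfold Spec_find_best_nace_code
  -- Name A's loop body and restate both ports up to beta/zeta (definitional) in terms of pvP/pvK.
  have hA1 : find_best_nace_code description nace_codes
      = nace_codes.foldl
          (fun best_code cd =>
            if pvP description cd then
              (fun (best_code : Option String) (cd : String × String) =>
                match best_code with
                | none => some cd.1
                | some bc =>
                  if PySem.Str.len (PySem.Str.lower cd.2) <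
                      PySem.Str.len (PySem.Str.lower ((PySem.Dict.get? ⟨nace_codes⟩ bc).getD "")) then
                    some cd.1
                  else best_code) best_code cd
            else best_code) none := rfl
  have hB1 : find_best_nace_code_alt description nace_codes
      = (if ((nace_codes.filter (pvP description)).map pvK).isEmpty then none
         else
           match PySem.List.min? ((nace_codes.filter (pvP description)).map pvK) (fun x => x) with
           | none => none
           | some shortest =>
             (nace_codes.find? (fun cd => pvP description cd && (pvK cd == shortest))).map
               Prod.fst) := rfl
  rw [hA1, hB1,
    PySem.List.foldl_if_eq_foldl_filter (pvP description)
      (fun (best_code : Option String) (cd : String × String) =>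
        match best_code with
        | none => some cd.1
        | some bc =>
          if PySem.Str.len (PySem.Str.lower cd.2) <
              PySem.Str.len (PySem.Str.lower ((PySem.Dict.get? ⟨nace_codes⟩ bc).getD "")) then
            some cd.1
          else best_code) nace_codes none]
  set m := nace_codes.filter (pvP description) with hmdef
  have hmem : ∀ cd ∈ m, PySem.Dict.get? ⟨nace_codes⟩ cd.1 = some cd.2 :=
    fun cd h => pv_get?_of_mem nace_codes hpre cd (List.mem_of_mem_filter h)
  have hA := pv_fold_eq nace_codes m hmem none (fun q hq => nomatch hq)
  simp only [Option.map_none] at hA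
  rw [hA, pvGenfold_none]
  cases hm : m with
  | nil => simp [pvFirstMin]
  | cons x t =>
    have hne : (m.map pvK) ≠ [] := by simp [hm]
    have hie : ((m.map pvK).isEmpty) = false := by simpa [List.isEmpty_iff] using hne
    rw [← hm]
    simp only [hie, Bool.false_eq_true, if_false]
    obtain ⟨y, hy⟩ : ∃ y, pvFirstMin m = some y := by
      rw [hm]
      cases hfm : pvFirstMin (x :: t) with
      | none => exact absurd hfm (pvFirstMin_ne_none x t)
      | some y => exact ⟨y, rfl⟩
    obtain ⟨T, hT⟩ : ∃ T, PySem.List.min? (m.map pvK) (fun x => x) = some T := by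
      cases hmin : PySem.List.min? (m.map pvK) (fun x => x) with
      | none => exact absurd ((PySem.List.min?_eq_none_iff _ _).mp hmin) hne
      | some T => exact ⟨T, rfl⟩
    rw [hy, hT]
    obtain ⟨hymin, hyfind⟩ := pvFirstMin_spec m y hy
    -- T = pvK y: T is the key of a member, hence ≥ the minimum pvK y; and T is ≤ every key.
    have hTmem := PySem.List.min?_mem hT
    have hTmin := PySem.List.min?_isMin hT
    obtain ⟨z, hzm, hzT⟩ := List.mem_map.mp hTmem
    have h1 : pvK y ≤ T := hzT ▸ hymin z hzm
    have h2 : T ≤ pvK y := by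
      have := hTmin (pvK y) (List.mem_map.mpr ⟨y, pvFirstMin_spec_mem m y hy, rfl⟩)
      simpa using this
    have hTy : T = pvK y := le_antisymm h2 h1
    subst hTy
    show Option.map Prod.fst (some y)
      = Option.map Prod.fst
          (List.find? (fun cd => pvP description cd && (pvK cd == pvK y)) nace_codes)
    rw [← pv_find?_filter nace_codes (pvP description) (fun cd => pvK cd == pvK y), ← hmdef, hyfind]
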